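-- pv_equiv track=rewrite | github.com/notavacillator/Misc. | minecraft2.py | solution
-- ===== SOURCE A (Python) =====
-- def solution(world, s, t, damage=0):
--     if s < t:
--         if world[s - 1] > world[s]:
--             damage = damage + world[s - 1] - world[s]
--         return solution(world, s + 1, t, damage)
--     elif s > t:
--         if world[s - 1] > world[s - 2]:
--             damage = damage + world[s - 1] - world[s - 2]
--         return solution(world, s - 1, t, damage)
--     elif s == t:
--         return damage
-- ===== SOURCE B (Python) =====
-- def solution(world, s, t, damage=0):
--     if s < t:
--         return damage + sum(max(world[i - 1] - world[i], 0) for i in range(s, t))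
--     if s > t:
--         return damage + sum(max(world[i - 1] - world[i - 2], 0) for i in range(t + 1, s + 1))
--     return damage
-- ===== Notes on version B (the rewrite author's own statement) =====
-- stated objective: simpler
-- what changed: Replaces A's tail recursion carrying a damage accumulator with a direct closed-form sum of the non-negative height drops over the index range, computed in one comprehension.
import Mathlib
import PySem

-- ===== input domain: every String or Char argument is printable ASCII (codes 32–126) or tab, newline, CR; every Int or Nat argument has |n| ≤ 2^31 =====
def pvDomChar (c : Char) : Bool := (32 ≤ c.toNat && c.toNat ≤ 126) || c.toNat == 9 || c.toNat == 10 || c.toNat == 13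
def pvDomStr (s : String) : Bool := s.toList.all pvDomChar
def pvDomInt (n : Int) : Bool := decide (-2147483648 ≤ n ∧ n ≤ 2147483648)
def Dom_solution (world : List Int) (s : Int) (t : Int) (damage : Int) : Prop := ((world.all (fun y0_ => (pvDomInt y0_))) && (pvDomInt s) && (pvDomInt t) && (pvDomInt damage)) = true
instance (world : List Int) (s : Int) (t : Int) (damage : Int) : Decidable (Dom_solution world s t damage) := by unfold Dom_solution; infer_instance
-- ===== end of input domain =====

-- ===== PORT A =====
-- B replaces A's accumulator-passing tail recursion by a closed-form sum of drops over the index range (objective: simpler).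
-- Out-of-range accesses (IndexError in Python) are excluded by Pre_solution; the ports use pyGetD with default 0 there.
def solution (world : List Int) (s : Int) (t : Int) (damage : Int) : Int :=
  if h1 : s < t then
    let damage1 := if PySem.List.pyGetD world (s-1) 0 > PySem.List.pyGetD world s 0 then
        damage + PySem.List.pyGetD world (s-1) 0 - PySem.List.pyGetD world s 0 else damage
    solution world (s+1) t damage1
  else if h2 : s > t then
    let damage1 := if PySem.List.pyGetD world (s-1) 0 > PySem.List.pyGetD world (s-2) 0 then
        damage + PySem.List.pyGetD world (s-1) 0 - PySem.List.pyGetD world (s-2) 0 else damage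
    solution world (s-1) t damage1
  else damage
termination_by (s - t).natAbs
decreasing_by all_goals omega

-- ===== PORT B =====
def solution_alt (world : List Int) (s : Int) (t : Int) (damage : Int) : Int :=
  if s < t then
    damage + ((PySem.List.pyRange s t 1).map
      (fun i => max (PySem.List.pyGetD world (i-1) 0 - PySem.List.pyGetD world i 0) 0)).sum
  else if s > t then
    damage + ((PySem.List.pyRange (t+1) (s+1) 1).map
      (fun i => max (PySem.List.pyGetD world (i-1) 0 - PySem.List.pyGetD world (i-2) 0) 0)).sum
  else damage

-- ===== PRECONDITION & SPEC =====
-- Pre_ excludes exactly the inputs on which Python A raises IndexError: the walk from s to t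
-- touches every index in [min s t - 1, max s t - 1], so all of them must be valid Python indices.
def Pre_solution (world : List Int) (s : Int) (t : Int) (damage : Int) : Prop :=
  s = t ∨ (-(world.length : Int) ≤ min s t - 1 ∧ max s t - 1 < world.length)
instance (world : List Int) (s : Int) (t : Int) (damage : Int) : Decidable (Pre_solution world s t damage) := by unfold Pre_solution; infer_instance
def pvWitness_solution : List Int × Int × Int × Int := ([3, 1, 4], 0, 3, 0)
def Spec_solution (world : List Int) (s : Int) (t : Int) (damage : Int) (out : Int) : Prop := out = solution_alt world s t damage
instance (world : List Int) (s : Int) (t : Int) (damage : Int) (out : Int) : Decidable (Spec_solution world s t damage out) := by unfold Spec_solution; infer_instance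

-- ===== CLAIM (what is proved, stated in full; the proofs are below) =====
def Claim_equal_solution : Prop := ∀ (world : List Int) (s : Int) (t : Int) (damage : Int), Dom_solution world s t damage → Pre_solution world s t damage → Spec_solution world s t damage (solution world s t damage)

-- ===== LEMMAS AND PROOFS =====

theorem alt_lt (world : List Int) (s t : Int) (damage : Int) (h : s ≤ t) :
    solution_alt world s t damage = damage + ((PySem.List.pyRange s t 1).map
      (fun i => max (PySem.List.pyGetD world (i-1) 0 - PySem.List.pyGetD world i 0) 0)).sum := by
  unfold solution_alt
  rcases lt_or_eq_of_le h with h' | h'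
  · simp [h']
  · simp [h', PySem.List.pyRange_one_eq_nil (le_refl t)]

theorem alt_gt (world : List Int) (s t damage : Int) (h : t ≤ s) :
    solution_alt world s t damage = damage + ((PySem.List.pyRange (t+1) (s+1) 1).map
      (fun i => max (PySem.List.pyGetD world (i-1) 0 - PySem.List.pyGetD world (i-2) 0) 0)).sum := by
  unfold solution_alt
  rcases lt_or_eq_of_le h with h' | h'
  · rw [if_neg (by omega), if_pos h']
  · simp [h']

theorem solution_eq_alt (world : List Int) : ∀ (n : Nat) (s t damage : Int),
    (s - t).natAbs = n → solution world s t damage = solution_alt world s t damage := by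
  intro n
  induction n using Nat.strong_induction_on with
  | _ n ih =>
    intro s t damage hn
    by_cases h1 : s < t
    · rw [solution]
      simp only [dif_pos h1]
      rw [ih ((s + 1 - t).natAbs) (by omega) (s+1) t _ rfl]
      rw [alt_lt world (s+1) t _ (by omega), alt_lt world s t damage (le_of_lt h1)]
      rw [PySem.List.pyRange_one_cons h1]
      simp only [List.map_cons, List.sum_cons]
      split_ifs <;> omega
    · by_cases h2 : s > t
      · rw [solution]
        simp only [dif_neg h1, dif_pos h2]
        rw [ih ((s - 1 - t).natAbs) (by omega) (s-1) t _ rfl]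
        rw [alt_gt world (s-1) t _ (by omega), alt_gt world s t damage (le_of_lt h2)]
        rw [show s - 1 + 1 = s by omega, PySem.List.pyRange_one_succ_right (by omega : t + 1 ≤ s)]
        simp only [List.map_append, List.sum_append, List.map_cons, List.sum_cons,
          List.map_nil, List.sum_nil]
        split_ifs <;> omega
      · have hst : s = t := by omega
        rw [solution, solution_alt]
        simp [hst]

-- ===== VERDICT (by name: the statement is the Claim_ definition above) =====
theorem solution_spec : Claim_equal_solution := by
  intro world s t damage _ _
  unfold Spec_solution
  exact solution_eq_alt world ((s - t).natAbs) s t damage rfl
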